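-- pv_equiv track=rewrite | github.com/geezee/mail-lang | util.py | is_address
-- ===== SOURCE A (Python) =====
-- def is_address(x): # [0-9A-Za-z.$_-]+@[0-9A-Za-z.$_-]
--     if len(x) < 3 or x[0] == '@': return False
--     at = False
--     for c in x:
--         if c == '@' and at: return False
--         if c >= '0' and c <= '9': continue
--         if c >= 'A' and c <= 'Z': continue
--         if c >= 'a' and c <= 'z': continue
--         if not (c == '.' or c == '$' or c == '_' or c == '-' or c == '@'): return False
--         at = at or c == '@'
--     return (not x[-1] == '@') and at
-- ===== SOURCE B (Python) =====
-- def is_address(x):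
--     allowed = set('0123456789abcdefghijklmnopqrstuvwxyzABCDEFGHIJKLMNOPQRSTUVWXYZ.$_-')
--     return (not x.startswith('@')
--             and not x.endswith('@')
--             and all(c == '@' or c in allowed for c in x)
--             and sum(c == '@' for c in x) == 1)
-- ===== Notes on version B (the rewrite author's own statement) =====
-- stated objective: simpler
-- what changed: A's single stateful scan with a seen-at-sign flag and early returns is replaced by independent whole-string checks: neither end is an at-sign, every character is allowed, and exactly one at-sign occurs.
import Mathlib
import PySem

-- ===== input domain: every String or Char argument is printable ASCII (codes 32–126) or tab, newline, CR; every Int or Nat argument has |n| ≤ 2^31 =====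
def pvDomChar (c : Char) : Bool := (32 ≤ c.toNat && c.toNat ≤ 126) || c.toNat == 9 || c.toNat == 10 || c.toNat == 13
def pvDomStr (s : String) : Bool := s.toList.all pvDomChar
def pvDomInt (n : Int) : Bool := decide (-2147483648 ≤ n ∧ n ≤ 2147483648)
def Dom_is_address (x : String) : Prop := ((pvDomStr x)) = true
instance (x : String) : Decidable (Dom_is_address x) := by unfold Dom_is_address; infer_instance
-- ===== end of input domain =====

-- B replaces A's single stateful scan (an 'at' flag with early returns) by independent
-- endpoint checks, an allowed-set membership pass and an '@'-count; objective: simpler.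

-- ===== PORT A =====
-- the for-loop with the 'at' flag; none = an early 'return False' inside the loop
def isAddressLoop : List Char → Bool → Option Bool
  | [], att => some att
  | c :: rest, att =>
    if c == '@' && att then none
    else if '0' ≤ c ∧ c ≤ '9' then isAddressLoop rest att
    else if 'A' ≤ c ∧ c ≤ 'Z' then isAddressLoop rest att
    else if 'a' ≤ c ∧ c ≤ 'z' then isAddressLoop rest att
    else if !(c == '.' || c == '$' || c == '_' || c == '-' || c == '@') then none
    else isAddressLoop rest (att || c == '@')

def is_address (x : String) : Bool :=
  let s := x.toList
  if s.length < 3 || PySem.List.pyGet? s 0 == some '@' then false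
  else
    match isAddressLoop s false with
    | none => false
    | some att => !(PySem.List.pyGet? s (-1) == some '@') && att

-- ===== PORT B =====
def allowedSet : PySem.Set Char :=
  PySem.Set.ofList "0123456789abcdefghijklmnopqrstuvwxyzABCDEFGHIJKLMNOPQRSTUVWXYZ.$_-".toList

def is_address_alt (x : String) : Bool :=
  let s := x.toList
  !PySem.Chars.startswith s ['@'] &&
  !PySem.Chars.endswith s ['@'] &&
  s.all (fun c => c == '@' || allowedSet.contains c) &&
  (s.foldl (fun n c => if c == '@' then n + 1 else n) (0 : Int) == 1)

-- ===== PRECONDITION & SPEC =====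
def Spec_is_address (x : String) (out : Bool) : Prop := out = is_address_alt x
instance (x : String) (out : Bool) : Decidable (Spec_is_address x out) := by unfold Spec_is_address; infer_instance

-- ===== CLAIM (what is proved, stated in full; the proofs are below) =====
def Claim_equal_is_address : Prop := ∀ (x : String), Dom_is_address x → Spec_is_address x (is_address x)

-- ===== LEMMAS AND PROOFS =====

-- A's per-character test, collected into one Bool
def validA (c : Char) : Bool :=
  decide ('0' ≤ c ∧ c ≤ '9') || decide ('A' ≤ c ∧ c ≤ 'Z') || decide ('a' ≤ c ∧ c ≤ 'z') ||
  (c == '.' || c == '$' || c == '_' || c == '-' || c == '@')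

theorem char_eq_iff (c d : Char) : c = d ↔ c.toNat = d.toNat := by
  rw [Char.ext_iff, ← UInt32.toNat_inj]; exact Iff.rfl

theorem char_le_iff (c d : Char) : c ≤ d ↔ c.toNat ≤ d.toNat := by
  rw [Char.le_def, UInt32.le_iff_toNat_le]; exact Iff.rfl

-- B's per-character test agrees with A's
theorem valid_eq (c : Char) : (c == '@' || allowedSet.contains c) = validA c := by
  have h : allowedSet.contains c = true ↔ c ∈ "0123456789abcdefghijklmnopqrstuvwxyzABCDEFGHIJKLMNOPQRSTUVWXYZ.$_-".toList := by
    simp [allowedSet, PySem.Set.contains]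
  rw [Bool.eq_iff_iff]
  simp only [Bool.or_eq_true, h, validA, beq_iff_eq, decide_eq_true_eq]
  have hl : "0123456789abcdefghijklmnopqrstuvwxyzABCDEFGHIJKLMNOPQRSTUVWXYZ.$_-".toList
      = ['0','1','2','3','4','5','6','7','8','9','a','b','c','d','e','f','g','h','i','j','k','l','m','n','o','p','q','r','s','t','u','v','w','x','y','z','A','B','C','D','E','F','G','H','I','J','K','L','M','N','O','P','Q','R','S','T','U','V','W','X','Y','Z','.','$','_','-'] := by decide
  rw [hl]
  simp only [List.mem_cons, List.not_mem_nil, or_false]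
  simp only [char_eq_iff, char_le_iff]
  simp
  omega

-- characterisation of A's loop: it falls through iff all chars are valid and at most one '@'
-- (counting the one already seen in 'att'), and then the flag reports whether an '@' occurred
theorem loop_eq (s : List Char) (att : Bool) :
    isAddressLoop s att =
      if s.all validA && decide (s.count '@' + (if att then 1 else 0) ≤ 1)
      then some (att || s.contains '@') else none := by
  induction s generalizing att with
  | nil => cases att <;> simp [isAddressLoop]
  | cons c rest ih =>
    by_cases hc : c = '@'
    · subst hc
      cases att with
      | true =>
        rw [isAddressLoop, if_pos (by decide), if_neg]
        simp only [Bool.and_eq_true, decide_eq_true_eq, List.count_cons_self, not_and, if_pos]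
        intro _
        omega
      | false =>
        rw [isAddressLoop, if_neg (by decide), if_neg (by decide), if_neg (by decide),
            if_neg (by decide), if_neg (by decide), ih]
        simp [List.count_cons_self, validA]
    · have hcb : (c == '@') = false := beq_eq_false_iff_ne.mpr hc
      have hL : isAddressLoop (c :: rest) att =
          (if validA c then isAddressLoop rest att else none) := by
        rw [isAddressLoop, if_neg (by simp [hcb])]
        by_cases h2 : ('0' ≤ c ∧ c ≤ '9')
        · rw [if_pos h2, if_pos (by simp [validA, h2])]
        by_cases h3 : ('A' ≤ c ∧ c ≤ 'Z')
        · rw [if_neg h2, if_pos h3, if_pos (by simp [validA, h3])]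
        by_cases h4 : ('a' ≤ c ∧ c ≤ 'z')
        · rw [if_neg h2, if_neg h3, if_pos h4, if_pos (by simp [validA, h4])]
        rw [if_neg h2, if_neg h3, if_neg h4]
        by_cases h5 : (c == '.' || c == '$' || c == '_' || c == '-' || c == '@') = true
        · rw [if_neg (by simp [h5]), if_pos (by simp [validA, h5]), hcb, Bool.or_false]
        · rw [if_pos (by simp at h5 ⊢; exact h5),
              if_neg (by simp [validA, h2, h3, h4, h5])]
      rw [hL]
      by_cases hv : validA c = true
      · rw [if_pos hv, ih]
        simp [List.all_cons, hv, hc, Ne.symm hc]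
      · rw [if_neg hv, if_neg (by simp [List.all_cons]; intro h; exact absurd h hv)]

theorem startswith_singleton (s : List Char) (c : Char) :
    PySem.Chars.startswith s [c] = (s.head? == some c) := by
  cases s <;> simp [PySem.Chars.startswith, List.isPrefixOf, eq_comm]

theorem endswith_singleton (s : List Char) (c : Char) :
    PySem.Chars.endswith s [c] = (s.getLast? == some c) := by
  rw [← List.head?_reverse]
  unfold PySem.Chars.endswith List.isSuffixOf
  cases h : s.reverse <;> simp [List.isPrefixOf, eq_comm]

theorem count_fold (s : List Char) :
    (s.foldl (fun n c => if c == '@' then n + 1 else n) (0 : Int) == 1)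
      = decide (s.count '@' = 1) := by
  rw [PySem.List.foldl_beq_add_one, Bool.eq_iff_iff]
  simp

-- ===== VERDICT (by name: the statement is the Claim_ definition above) =====
theorem is_address_spec : Claim_equal_is_address := by
  unfold Claim_equal_is_address Spec_is_address
  intro x _
  unfold is_address is_address_alt
  generalize x.toList = s
  simp only [startswith_singleton, endswith_singleton, count_fold]
  match s with
  | [] => decide
  | [a] =>
    by_cases h : (a == '@') = true <;>
      simp [h, List.count_singleton]
  | [a, b] =>
    by_cases ha : (a == '@') = true <;> by_cases hb : (b == '@') = true <;>
      simp [ha, hb, List.count_cons]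
  | a :: b :: c :: t =>
    simp only [PySem.List.pyGet?_zero_cons, PySem.List.pyGet?_neg_one, loop_eq]
    by_cases ha : a = '@'
    · subst ha; simp
    · rw [if_neg (by simp [ha])]
      have hvB : ((a :: b :: c :: t).all fun c => c == '@' || allowedSet.contains c)
          = (a :: b :: c :: t).all validA := by simp only [valid_eq]
      rw [hvB]
      by_cases hall : ((a :: b :: c :: t).all validA) = true
      · by_cases hcnt : (List.count '@' (a :: b :: c :: t) ≤ 1)
        · rw [if_pos (by simp [hall, hcnt])]
          by_cases hm : '@' ∈ (a :: b :: c :: t)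
          · have hc1 : List.count '@' (a :: b :: c :: t) = 1 :=
              le_antisymm hcnt (List.count_pos_iff.mpr hm)
            simp [ha, hm, hc1, hall]
          · have hc0 : List.count '@' (a :: b :: c :: t) = 0 := List.count_eq_zero.mpr hm
            simp [hm, hc0]
        · rw [if_neg (by simp [hcnt])]
          have hne1 : ¬ (List.count '@' (a :: b :: c :: t) = 1) := by omega
          simp [hne1]
      · rw [if_neg (by simp [hall])]
        simp only [Bool.not_eq_true] at hall
        simp [hall]
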